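-- pv_equiv track=rewrite | github.com/malharshah04/semester-5-miniproject-py | license_plate_detector.py | count_cars_by_state
-- ===== SOURCE A (Python) =====
-- def count_cars_by_state(plate_numbers):
--     """
--     Count the number of cars for each state based on license plate prefixes.
--     """
--     state_counts = {}
--     for plate in plate_numbers:
--         if len(plate) >= 2:
--             state_code = plate[:2]  # First two characters represent the state
--             if state_code in state_counts:
--                 state_counts[state_code] += 1
--             else:
--                 state_counts[state_code] = 1
--     return state_counts
-- ===== SOURCE B (Python) =====
-- def count_cars_by_state(plate_numbers):
--     """
--     Count the number of cars for each state based on license plate prefixes.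
--     Divide and conquer: count each half recursively, then merge the two dicts.
--     """
--     def merge(left, right):
--         for code, c in right.items():
--             left[code] = left.get(code, 0) + c
--         return left
--
--     def counts(plates):
--         if len(plates) <= 1:
--             if plates and len(plates[0]) >= 2:
--                 return {plates[0][:2]: 1}
--             return {}
--         mid = len(plates) // 2
--         return merge(counts(plates[:mid]), counts(plates[mid:]))
--
--     return counts(plate_numbers)
-- ===== Notes on version B (the rewrite author's own statement) =====
-- stated objective: alternative
-- what changed: B replaces A's single-pass dict-increment scan by a divide-and-conquer: it recursively counts the two halves of the list and merges the two count dicts (increment-by-count merge), instead of ever incrementing per element in one pass.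
import Mathlib
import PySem

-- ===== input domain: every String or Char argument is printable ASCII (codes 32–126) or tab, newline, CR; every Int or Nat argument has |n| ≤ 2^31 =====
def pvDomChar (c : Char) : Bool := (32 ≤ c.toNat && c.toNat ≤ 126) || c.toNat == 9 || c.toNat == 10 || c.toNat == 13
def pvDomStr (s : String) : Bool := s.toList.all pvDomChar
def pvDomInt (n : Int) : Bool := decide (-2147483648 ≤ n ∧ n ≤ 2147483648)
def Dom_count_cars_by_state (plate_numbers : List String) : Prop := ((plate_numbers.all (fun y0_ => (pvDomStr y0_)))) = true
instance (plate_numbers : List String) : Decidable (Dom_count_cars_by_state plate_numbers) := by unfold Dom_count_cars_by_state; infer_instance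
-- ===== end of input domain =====

-- B replaces A's single-pass dict-increment scan by divide-and-conquer: count each half recursively and merge the two count dicts (alternative decomposition, same results).


-- ===== PORT A =====
-- A: one pass over the plates, incrementing a dict entry per 2-char prefix.
def count_cars_by_state (plate_numbers : List String) : List (String × Int) :=
  (plate_numbers.foldl (fun state_counts plate =>
    if 2 ≤ PySem.Str.len plate then
      let state_code := PySem.Str.slice plate none (some 2)
      if state_counts.contains state_code then
        state_counts.insert state_code (state_counts.getD state_code 0 + 1)
      else
        state_counts.insert state_code 1
    else state_counts) PySem.Dict.empty).items

-- ===== PORT B =====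
-- merge(left, right): fold right's items into left, adding counts.
def pvMergeB (left right : PySem.Dict String Int) : PySem.Dict String Int :=
  right.items.foldl (fun left p => left.insert p.1 (left.getD p.1 0 + p.2)) left

-- counts(plates): ≤1 plate directly, else merge the counts of the two halves.
-- plates[:mid] / plates[mid:] with 0 ≤ mid = len(plates)//2 ≤ len are exactly take/drop mid.
def pvCountsB (plates : List String) : PySem.Dict String Int :=
  if plates.length ≤ 1 then
    match plates with
    | [] => PySem.Dict.empty
    | p :: _ =>
      if 2 ≤ PySem.Str.len p then PySem.Dict.empty.insert (PySem.Str.slice p none (some 2)) 1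
      else PySem.Dict.empty
  else
    let mid := plates.length / 2
    pvMergeB (pvCountsB (plates.take mid)) (pvCountsB (plates.drop mid))
  termination_by plates.length
  decreasing_by
  · simp only [List.length_take]; omega
  · simp only [List.length_drop]; omega

def count_cars_by_state_alt (plate_numbers : List String) : List (String × Int) :=
  (pvCountsB plate_numbers).items

-- ===== PRECONDITION & SPEC =====
def Spec_count_cars_by_state (plate_numbers : List String) (out : List (String × Int)) : Prop := out = count_cars_by_state_alt plate_numbers
instance (plate_numbers : List String) (out : List (String × Int)) : Decidable (Spec_count_cars_by_state plate_numbers out) := by unfold Spec_count_cars_by_state; infer_instance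

-- ===== CLAIM (what is proved, stated in full; the proofs are below) =====
def Claim_equal_count_cars_by_state : Prop := ∀ (plate_numbers : List String), Dom_count_cars_by_state plate_numbers → Spec_count_cars_by_state plate_numbers (count_cars_by_state plate_numbers)

-- ===== LEMMAS AND PROOFS =====

-- the 2-char prefixes A and B both count
def pvCodes (plates : List String) : List String :=
  (plates.filter (fun plate => decide (2 ≤ PySem.Str.len plate))).map
    (fun plate => PySem.Str.slice plate none (some 2))

-- A's two branches both store (old count, default 0) + 1; the length guard selects exactly the codes list.
theorem pv_foldA_eq_counter_fold (plates : List String) (d : PySem.Dict String Int) :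
    plates.foldl (fun state_counts plate =>
      if 2 ≤ PySem.Str.len plate then
        let state_code := PySem.Str.slice plate none (some 2)
        if state_counts.contains state_code then
          state_counts.insert state_code (state_counts.getD state_code 0 + 1)
        else
          state_counts.insert state_code 1
      else state_counts) d
    = (pvCodes plates).foldl (fun d x => d.insert x (d.getD x 0 + 1)) d := by
  induction plates generalizing d with
  | nil => rfl
  | cons p ps ih =>
    simp only [pvCodes, List.foldl_cons, List.filter_cons]
    by_cases hlen : 2 ≤ PySem.Str.len p
    · simp only [hlen, if_pos, decide_true, List.map_cons, List.foldl_cons]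
      by_cases hc : PySem.Dict.contains d (PySem.Str.slice p none (some 2))
      · simp only [hc, if_pos]
        exact ih _
      · rw [if_neg (by simp [hc]),
          PySem.Dict.getD_of_not_contains _ _ (by simpa using hc)]
        exact ih _
    · simp only [hlen, if_neg, not_false_iff, decide_false]
      exact ih _

-- value of the counting fold (insert form, arbitrary start)
theorem pv_getD_count_fold (ys : List String) (d : PySem.Dict String Int) (k : String) :
    (ys.foldl (fun d x => d.insert x (d.getD x 0 + 1)) d).getD k 0
      = d.getD k 0 + ys.count k := by
  induction ys generalizing d with
  | nil => simp
  | cons y ys ih =>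
    simp only [List.foldl_cons, ih, PySem.Dict.getD_insert, List.count_cons]
    by_cases h : k = y
    · simp [h]; ring
    · simp [h, Ne.symm h]

-- value of B's merge fold over an arbitrary pair list
theorem pv_getD_merge_fold (l : List (String × Int)) (d : PySem.Dict String Int) (k : String) :
    (l.foldl (fun d p => d.insert p.1 (d.getD p.1 0 + p.2)) d).getD k 0
      = d.getD k 0 + ((l.filter (fun p => p.1 = k)).map (·.2)).sum := by
  induction l generalizing d with
  | nil => simp
  | cons q l ih =>
    simp only [List.foldl_cons, ih, PySem.Dict.getD_insert, List.filter_cons]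
    by_cases h : q.1 = k
    · simp [h]; ring
    · have h' : ¬ k = q.1 := fun hh => h hh.symm
      simp [h, h']

-- filtering a duplicate-free list for one element
theorem pv_filter_eq_of_nodup (l : List String) (hl : l.Nodup) (k : String) :
    l.filter (fun x => x = k) = if k ∈ l then [k] else [] := by
  induction l with
  | nil => simp
  | cons a l ih =>
    rw [List.nodup_cons] at hl
    obtain ⟨ha, hl'⟩ := hl
    simp only [List.filter_cons]
    by_cases h : a = k
    · subst h
      simp [ha, ih hl']
    · simp only [h, decide_false, ih hl', List.mem_cons]
      have : ¬ k = a := fun hh => h hh.symm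
      simp [this]

-- merging Counter(ys) into d is the counting fold of ys over d
theorem pv_merge_counter (ys : List String) (d : PySem.Dict String Int)
    (hd : d.keys.Nodup) :
    pvMergeB d (PySem.Dict.counter ys)
      = ys.foldl (fun d x => d.insert x (d.getD x 0 + 1)) d := by
  have hkL : (pvMergeB d (PySem.Dict.counter ys)).keys = PySem.Set.update d.keys ys := by
    unfold pvMergeB
    rw [PySem.Dict.keys_foldl_insert_key (key := Prod.fst) (f := fun d p => d.getD p.1 0 + p.2)]
    have hmap : (PySem.Dict.counter ys).items.map Prod.fst = PySem.Set.ofList ys := by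
      have := PySem.Dict.keys_counter (κ := String) ys
      simpa [PySem.Dict.keys] using this
    rw [hmap, PySem.Set.update_eq_append_filter, PySem.Set.update_eq_append_filter,
      PySem.Set.ofList_ofList]
  have hkR : (ys.foldl (fun d x => d.insert x (d.getD x 0 + 1)) d).keys
      = PySem.Set.update d.keys ys :=
    PySem.Dict.keys_foldl_insert ys (fun d x => d.getD x 0 + 1) d
  have hnd : (PySem.Set.update d.keys ys).Nodup := PySem.Set.nodup_update d.keys ys hd
  have hg : ∀ k, (pvMergeB d (PySem.Dict.counter ys)).getD k 0
      = (ys.foldl (fun d x => d.insert x (d.getD x 0 + 1)) d).getD k 0 := by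
    intro k
    rw [pv_getD_count_fold]
    unfold pvMergeB
    rw [pv_getD_merge_fold, PySem.Dict.items_counter]
    congr 1
    rw [List.filter_map, List.map_map]
    have hcomp : ((fun p : String × Int => decide (p.1 = k)) ∘
        (fun k' => (k', (ys.count k' : Int)))) = fun k' => decide (k' = k) := rfl
    rw [hcomp, pv_filter_eq_of_nodup _ (PySem.Set.nodup_ofList ys) k]
    by_cases hk : k ∈ ys
    · simp [PySem.Set.mem_ofList, hk]
    · simp [PySem.Set.mem_ofList, hk, List.count_eq_zero_of_not_mem hk]
  apply PySem.Dict.ext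
  rw [PySem.Dict.items_eq_map_keys _ (by rw [hkL]; exact hnd) (0 : Int),
    PySem.Dict.items_eq_map_keys _ (by rw [hkR]; exact hnd) (0 : Int), hkL, hkR]
  exact List.map_congr_left (fun k _ => by rw [hg k])

-- B's recursion computes the count fold of the codes list
-- codes distribute over list append
theorem pv_codes_append (xs ys : List String) :
    pvCodes (xs ++ ys) = pvCodes xs ++ pvCodes ys := by
  simp [pvCodes]

-- B's recursion computes the count fold of the codes list
theorem pv_countsB_eq (plates : List String) :
    pvCountsB plates
      = (pvCodes plates).foldl (fun d x => d.insert x (d.getD x 0 + 1)) PySem.Dict.empty := by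
  induction hn : plates.length using Nat.strong_induction_on generalizing plates with
  | _ n ih =>
    rw [pvCountsB.eq_def]
    by_cases h1 : plates.length ≤ 1
    · rw [if_pos h1]
      match plates with
      | [] => simp [pvCodes]
      | p :: rest =>
        have : rest = [] := by
          cases rest with
          | nil => rfl
          | cons q r => simp at h1
        subst this
        simp only [pvCodes, List.filter_cons, List.filter_nil]
        by_cases hp : 2 ≤ p.length
        · simp [PySem.Str.len_eq, hp, PySem.Dict.getD_empty]
        · simp [PySem.Str.len_eq, hp]
    · rw [if_neg h1]
      subst hn
      have hmidpos : 1 ≤ plates.length / 2 := by omega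
      have hmidlt : plates.length / 2 < plates.length := by omega
      have htake : (plates.take (plates.length / 2)).length < plates.length := by
        simp only [List.length_take]; omega
      have hdrop : (plates.drop (plates.length / 2)).length < plates.length := by
        simp only [List.length_drop]; omega
      show pvMergeB (pvCountsB (plates.take (plates.length / 2)))
          (pvCountsB (plates.drop (plates.length / 2))) = _
      rw [ih _ htake _ rfl, ih _ hdrop _ rfl,
        PySem.Dict.foldl_insert_getD_add_one_eq_counter (pvCodes (plates.drop (plates.length / 2))),
        pv_merge_counter _ _ (by
          rw [PySem.Dict.foldl_insert_getD_add_one_eq_counter]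
          exact PySem.Dict.nodup_keys_counter _),
        ← List.foldl_append, ← pv_codes_append, List.take_append_drop]

-- ===== VERDICT (by name: the statement is the Claim_ definition above) =====
theorem count_cars_by_state_spec : Claim_equal_count_cars_by_state := by
  intro plate_numbers _
  show _ = _
  unfold count_cars_by_state count_cars_by_state_alt
  rw [pv_foldA_eq_counter_fold, pv_countsB_eq]
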